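-- pv_equiv track=rewrite | github.com/Jiliar/misiontic-ciclo1-python | retos/reto1.py | alert_generation
-- ===== SOURCE A (Python) =====
-- def alert_generation(value):
--     result = 0
--     ALERTAS = [ ((-1,50),     'verde'),
--                 ((50,100),    'amarillo'),
--                 ((100,150),   'naranja'),
--                 ((150,200),   'rojo'),
--                 ((200,300),   'morado'),
--                 ((300,999999999999999999),'marron')]
--     for val in ALERTAS:
--         if (value > val[0][0]) and (value <= val[0][1]):
--             result = val[1]
--             break
--
--     return result
-- ===== SOURCE B (Python) =====
-- import bisect
--
-- def alert_generation(value):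
--     # Binary search over sorted upper bounds instead of a linear scan of (low, high] tuples.
--     if value <= -1 or value > 999999999999999999:
--         return 0
--     uppers = [50, 100, 150, 200, 300, 999999999999999999]
--     colors = ['verde', 'amarillo', 'naranja', 'rojo', 'morado', 'marron']
--     return colors[bisect.bisect_left(uppers, value)]
-- ===== Notes on version B (the rewrite author's own statement) =====
-- stated objective: idiomatic
-- what changed: Replaces the linear scan over (low,high] interval tuples with a bisect_left binary search over a sorted list of upper bounds with a parallel colors list.
-- outside the precondition, e.g. on alert_generation(-5): A returns 0, B returns 0; on alert_generation(-1): A returns 0, B returns 0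
import Mathlib
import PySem

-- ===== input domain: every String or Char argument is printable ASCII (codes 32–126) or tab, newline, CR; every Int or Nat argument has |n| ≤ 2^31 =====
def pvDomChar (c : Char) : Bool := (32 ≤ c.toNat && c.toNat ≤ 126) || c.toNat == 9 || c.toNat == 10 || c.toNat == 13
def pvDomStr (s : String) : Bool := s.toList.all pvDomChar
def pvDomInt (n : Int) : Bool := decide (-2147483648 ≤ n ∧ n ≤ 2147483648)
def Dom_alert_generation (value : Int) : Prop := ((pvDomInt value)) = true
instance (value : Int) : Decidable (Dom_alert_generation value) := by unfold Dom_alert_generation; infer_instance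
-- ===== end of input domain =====

-- B replaces A's linear scan over (low,high] interval tuples by a bisect_left binary search
-- over sorted upper bounds with a parallel colors list (objective: idiomatic).

-- ===== PORT A =====
-- first-match loop over the ALERTAS table, carrying the initial result
def agLoop (value : Int) (result : String) : List ((Int × Int) × String) → String
  | [] => result
  | val :: rest =>
      if value > val.1.1 ∧ value ≤ val.1.2 then val.2
      else agLoop value result rest

def alert_generation (value : Int) : String :=
  let ALERTAS : List ((Int × Int) × String) :=
    [ ((-1, 50), "verde"), ((50, 100), "amarillo"), ((100, 150), "naranja"),
      ((150, 200), "rojo"), ((200, 300), "morado"),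
      ((300, 999999999999999999), "marron") ]
  -- Python's initial result is the int 0; inputs where it is returned lie outside Pre_
  agLoop value "0" ALERTAS

-- ===== PORT B =====
-- bisect.bisect_left on a sorted list = number of elements strictly below x (stdlib contract)
def bisectLeft (l : List Int) (x : Int) : Nat := (l.filter (· < x)).length

def alert_generation_alt (value : Int) : String :=
  if value ≤ -1 ∨ value > 999999999999999999 then "0"  -- Python returns int 0 here; outside Pre_
  else
    let uppers : List Int := [50, 100, 150, 200, 300, 999999999999999999]
    let colors : List String := ["verde", "amarillo", "naranja", "rojo", "morado", "marron"]
    colors.getD (bisectLeft uppers value) "0"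

-- ===== PRECONDITION & SPEC =====
-- Pre_ excludes value ≤ -1 (and value above the last bound), where A falls through the table
-- and returns the int 0, which is not a value of the declared String type.
def Pre_alert_generation (value : Int) : Prop := -1 < value ∧ value ≤ 999999999999999999
instance (value : Int) : Decidable (Pre_alert_generation value) := by
  unfold Pre_alert_generation; infer_instance
def pvWitness_alert_generation : Int := (75)

def Spec_alert_generation (value : Int) (out : String) : Prop := out = alert_generation_alt value
instance (value : Int) (out : String) : Decidable (Spec_alert_generation value out) := by unfold Spec_alert_generation; infer_instance

-- ===== CLAIM (what is proved, stated in full; the proofs are below) =====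
def Claim_equal_alert_generation : Prop := ∀ (value : Int), Dom_alert_generation value → Pre_alert_generation value → Spec_alert_generation value (alert_generation value)

-- ===== LEMMAS AND PROOFS =====

-- ===== VERDICT (by name: the statement is the Claim_ definition above) =====
set_option maxHeartbeats 2000000 in
theorem alert_generation_spec : Claim_equal_alert_generation := by
  intro value _ hpre
  obtain ⟨h1, h2⟩ := hpre
  unfold Spec_alert_generation alert_generation alert_generation_alt agLoop bisectLeft
  simp only [List.filter_cons, List.filter_nil, decide_eq_true_eq]
  split_ifs <;> simp_all [List.getD] <;> (try omega) <;>
    (simp only [agLoop]; split_ifs <;> simp_all <;> omega)
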